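-- pv_equiv track=rewrite | github.com/emrity4/rime-bot | bot.py | parse_single_csv
-- ===== SOURCE A (Python) =====
-- from typing import Dict, List, Optional, Tuple
--
-- def parse_single_csv(csv_content: str) -> Tuple[List[Dict], str]:
--     """Parse single CSV for backward compatibility"""
--     lines = csv_content.strip().split('\n')
--     if len(lines) < 2:
--         return [], "Not enough data"
--
--     questions = []
--     errors = []
--
--     for i, line in enumerate(lines[1:], start=1):
--         if not line.strip():
--             continue
--
--         parts = []
--         current = ''
--         in_quotes = False
--
--         for char in line:
--             if char == '"':
--                 in_quotes = not in_quotes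
--             elif char == ',' and not in_quotes:
--                 parts.append(current.strip())
--                 current = ''
--             else:
--                 current += char
--         parts.append(current.strip())
--         parts = [p.strip('"') for p in parts]
--
--         if len(parts) >= 6:
--             question_text = parts[0]
--             options = {
--                 'A': parts[1] if len(parts) > 1 else '',
--                 'B': parts[2] if len(parts) > 2 else '',
--                 'C': parts[3] if len(parts) > 3 else '',
--                 'D': parts[4] if len(parts) > 4 else ''
--             }
--             correct = parts[5].upper()
--
--             if correct in ['A', 'B', 'C', 'D'] and all(options.values()):
--                 questions.append({
--                     'text': question_text,
--                     'options': options,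
--                     'correct': correct
--                 })
--             else:
--                 errors.append(f"Line {i}: Invalid format")
--         else:
--             errors.append(f"Line {i}: Not enough columns")
--
--     if not questions:
--         return [], "No valid questions found.\n" + "\n".join(errors[:3])
--
--     msg = f"✅ Loaded {len(questions)} questions"
--     if errors:
--         msg += f"\n⚠️ Skipped {len(errors)} invalid rows"
--
--     return questions, msg
-- ===== SOURCE B (Python) =====
-- def _fields(line):
--     """Split a CSV line by quote segments instead of a per-char state machine:
--     even segments are outside quotes (commas delimit), odd segments are quoted
--     (commas literal); adjacent segments glue into the same field."""
--     parts = ['']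
--     quoted = False
--     for seg in line.split('"'):
--         if quoted:
--             parts[-1] += seg
--         else:
--             pieces = seg.split(',')
--             parts[-1] += pieces[0]
--             parts += pieces[1:]
--         quoted = not quoted
--     return [p.strip().strip('"') for p in parts]
--
--
-- def _judge(i, parts):
--     """Classify one row: (question dict, None) or (None, error message)."""
--     if len(parts) < 6:
--         return None, f"Line {i}: Not enough columns"
--     correct = parts[5].upper()
--     if correct in ('A', 'B', 'C', 'D') and all(parts[1:5]):
--         return {'text': parts[0],
--                 'options': {'A': parts[1], 'B': parts[2],
--                             'C': parts[3], 'D': parts[4]},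
--                 'correct': correct}, None
--     return None, f"Line {i}: Invalid format"
--
--
-- def parse_single_csv(csv_content):
--     """Parse single CSV for backward compatibility"""
--     lines = csv_content.strip().split('\n')
--     if len(lines) < 2:
--         return [], "Not enough data"
--
--     results = [_judge(i, _fields(line))
--                for i, line in enumerate(lines[1:], start=1)
--                if line.strip()]
--     questions = [q for q, _ in results if q is not None]
--     errors = [e for _, e in results if e is not None]
--
--     if not questions:
--         return [], "No valid questions found.\n" + "\n".join(errors[:3])
--
--     msg = f"✅ Loaded {len(questions)} questions"
--     if errors:
--         msg += f"\n⚠️ Skipped {len(errors)} invalid rows"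
--     return questions, msg
-- ===== Notes on version B (the rewrite author's own statement) =====
-- stated objective: alternative
-- what changed: The per-character quote-parity state machine is replaced by splitting each line at quote characters and assembling fields from the alternating unquoted/quoted segments (unquoted segments further split at commas), and the questions/errors accumulator loop is replaced by a map/filter pipeline over classified rows.
import Mathlib
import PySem

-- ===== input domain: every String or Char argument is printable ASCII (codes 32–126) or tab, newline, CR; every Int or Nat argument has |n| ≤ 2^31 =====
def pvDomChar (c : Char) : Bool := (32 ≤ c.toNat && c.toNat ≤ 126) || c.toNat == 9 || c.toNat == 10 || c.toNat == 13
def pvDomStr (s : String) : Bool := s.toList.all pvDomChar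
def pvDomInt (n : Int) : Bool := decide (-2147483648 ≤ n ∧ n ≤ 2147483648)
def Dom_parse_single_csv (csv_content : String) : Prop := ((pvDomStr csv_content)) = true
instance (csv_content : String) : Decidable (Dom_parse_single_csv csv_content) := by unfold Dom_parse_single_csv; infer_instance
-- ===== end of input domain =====

-- B replaces A's per-character quote state machine by a split-on-quotes segment
-- assembly and A's accumulator loop by a map/filter pipeline (objective: alternative,
-- same cost). The nested 'options' dict of a question is flattened into the
-- association list as keys "A".."D" (the nested dict is outside the declared
-- return-type convention); both ports flatten identically.

-- ===== PORT A =====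
-- f"Line {i}" ++ tail
def pvLineMsg (i : Int) (tail : List Char) : List Char :=
  "Line ".toList ++ PySem.Int.toChars i ++ tail

-- the question dict {'text':…, 'options': {'A':…,…}, 'correct':…}, flattened
def pvQuestion (qt oA oB oC oD correct : List Char) : List (String × String) :=
  [("text", String.ofList qt), ("A", String.ofList oA), ("B", String.ofList oB),
   ("C", String.ofList oC), ("D", String.ofList oD), ("correct", String.ofList correct)]

-- A's inner char loop body: state (parts, current, in_quotes)
def pvAStep (st : List (List Char) × List Char × Bool) (c : Char) :
    List (List Char) × List Char × Bool :=
  if c = '"' then (st.1, st.2.1, !st.2.2)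
  else if c = ',' ∧ st.2.2 = false then (st.1 ++ [PySem.Chars.strip st.2.1], [], st.2.2)
  else (st.1, st.2.1 ++ [c], st.2.2)

-- parts after the loop, the final append and the strip('"') comprehension
def pvAParts (line : List Char) : List (List Char) :=
  let st := line.foldl pvAStep ([], [], false)
  (st.1 ++ [PySem.Chars.strip st.2.1]).map (fun p => PySem.Chars.stripChars p ['"'])

-- A's outer loop body over (i, line), state (questions, errors)
def pvALine (st : List (List (String × String)) × List (List Char)) (p : Int × List Char) :
    List (List (String × String)) × List (List Char) :=
  if PySem.Chars.strip p.2 = [] then st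
  else
    let parts := pvAParts p.2
    if 6 ≤ parts.length then
      let qt := PySem.List.pyGetD parts 0 []
      let oA := if 1 < parts.length then PySem.List.pyGetD parts 1 [] else []
      let oB := if 2 < parts.length then PySem.List.pyGetD parts 2 [] else []
      let oC := if 3 < parts.length then PySem.List.pyGetD parts 3 [] else []
      let oD := if 4 < parts.length then PySem.List.pyGetD parts 4 [] else []
      let correct := PySem.Chars.upper (PySem.List.pyGetD parts 5 [])
      if (correct = ['A'] ∨ correct = ['B'] ∨ correct = ['C'] ∨ correct = ['D']) ∧
          (oA ≠ [] ∧ oB ≠ [] ∧ oC ≠ [] ∧ oD ≠ []) then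
        (st.1 ++ [pvQuestion qt oA oB oC oD correct], st.2)
      else (st.1, st.2 ++ [pvLineMsg p.1 ": Invalid format".toList])
    else (st.1, st.2 ++ [pvLineMsg p.1 ": Not enough columns".toList])

def parse_single_csv (csv_content : String) : (List (List (String × String))) × String :=
  let lines := PySem.Chars.splitOn (PySem.Chars.strip csv_content.toList) ['\n']
  if lines.length < 2 then ([], "Not enough data")
  else
    let st := (PySem.List.enumerate (lines.drop 1) 1).foldl pvALine ([], [])
    if st.1 = [] then
      ([], String.ofList ("No valid questions found.\n".toList ++
        PySem.Chars.join ['\n'] (PySem.List.slice st.2 none (some 3))))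
    else
      let msg := "✅ Loaded ".toList ++ PySem.Int.toChars (st.1.length : Int) ++ " questions".toList
      (st.1, String.ofList (if st.2 ≠ [] then
        msg ++ "\n⚠️ Skipped ".toList ++ PySem.Int.toChars (st.2.length : Int) ++ " invalid rows".toList
      else msg))

-- ===== PORT B =====
-- parts[-1] += x; the parts list is kept in REVERSE order so that this is a head update
def pvBAppLast (r : List (List Char)) (x : List Char) : List (List Char) :=
  match r with
  | [] => [x]
  | h :: t => (h ++ x) :: t

-- B's loop body over quote segments: state (reversed parts, quoted)
def pvBSeg (st : List (List Char) × Bool) (seg : List Char) : List (List Char) × Bool :=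
  if st.2 then (pvBAppLast st.1 seg, !st.2)
  else
    let pieces := PySem.Chars.splitOn seg [',']
    (pieces.tail.reverse ++ pvBAppLast st.1 (pieces.headD []), !st.2)

-- _fields: split on '"', assemble, then the strip().strip('"') comprehension
def pvBFields (line : List Char) : List (List Char) :=
  ((((PySem.Chars.splitOn line ['"']).foldl pvBSeg ([[]], false)).1).reverse).map
    (fun p => PySem.Chars.stripChars (PySem.Chars.strip p) ['"'])

-- _judge: one row to (question?, error?)
def pvBJudge (i : Int) (parts : List (List Char)) :
    Option (List (String × String)) × Option (List Char) :=
  if parts.length < 6 then (none, some (pvLineMsg i ": Not enough columns".toList))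
  else
    let correct := PySem.Chars.upper (PySem.List.pyGetD parts 5 [])
    if correct ∈ [['A'], ['B'], ['C'], ['D']] ∧
        (PySem.List.slice parts (some 1) (some 5)).all (fun p => !p.isEmpty) = true then
      (some (pvQuestion (PySem.List.pyGetD parts 0 []) (PySem.List.pyGetD parts 1 [])
        (PySem.List.pyGetD parts 2 []) (PySem.List.pyGetD parts 3 [])
        (PySem.List.pyGetD parts 4 []) correct), none)
    else (none, some (pvLineMsg i ": Invalid format".toList))

def parse_single_csv_alt (csv_content : String) : (List (List (String × String))) × String :=
  let lines := PySem.Chars.splitOn (PySem.Chars.strip csv_content.toList) ['\n']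
  if lines.length < 2 then ([], "Not enough data")
  else
    let results := ((PySem.List.enumerate (lines.drop 1) 1).filter
        (fun p => !(PySem.Chars.strip p.2).isEmpty)).map
      (fun p => pvBJudge p.1 (pvBFields p.2))
    let questions := results.filterMap (·.1)
    let errors := results.filterMap (·.2)
    if questions = [] then
      ([], String.ofList ("No valid questions found.\n".toList ++
        PySem.Chars.join ['\n'] (PySem.List.slice errors none (some 3))))
    else
      let msg := "✅ Loaded ".toList ++ PySem.Int.toChars (questions.length : Int) ++ " questions".toList
      (questions, String.ofList (if errors ≠ [] then
        msg ++ "\n⚠️ Skipped ".toList ++ PySem.Int.toChars (errors.length : Int) ++ " invalid rows".toList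
      else msg))

-- ===== PRECONDITION & SPEC =====
def Spec_parse_single_csv (csv_content : String) (out : (List (List (String × String))) × String) : Prop := out = parse_single_csv_alt csv_content
instance (csv_content : String) (out : (List (List (String × String))) × String) : Decidable (Spec_parse_single_csv csv_content out) := by unfold Spec_parse_single_csv; infer_instance

-- ===== CLAIM (what is proved, stated in full; the proofs are below) =====
def Claim_equal_parse_single_csv : Prop := ∀ (csv_content : String), Dom_parse_single_csv csv_content → Spec_parse_single_csv csv_content (parse_single_csv csv_content)

-- ===== LEMMAS AND PROOFS =====

def pvConsHead (x : List Char) : List (List Char) → List (List Char)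
  | [] => [x]
  | f :: fs => (x ++ f) :: fs

theorem pvConsHead_consHead (a b : List Char) (r : List (List Char)) :
    pvConsHead a (pvConsHead b r) = pvConsHead (a ++ b) r := by
  cases r <;> simp [pvConsHead]

theorem pvGo_acc (d : Char) (n : Nat) : ∀ (s cur : List Char) (acc : List (List Char)),
    PySem.Chars.splitOn.go [d] n s cur acc =
      acc.reverse ++ PySem.Chars.splitOn.go [d] n s cur [] := by
  induction n with
  | zero =>
    intro s cur acc
    rw [PySem.Chars.splitOn.go, PySem.Chars.splitOn.go] <;> simp
  | succ n ih =>
    intro s cur acc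
    cases s with
    | nil =>
      rw [PySem.Chars.splitOn.go, PySem.Chars.splitOn.go] <;> simp
    | cons c cs =>
      rw [PySem.Chars.splitOn.go, PySem.Chars.splitOn.go]
      by_cases h : [d].isPrefixOf (c :: cs) = true
      · simp only [h, if_true]
        rw [ih _ [] (cur.reverse :: acc), ih _ [] [cur.reverse]]
        simp
      · simp only [h]
        exact ih _ _ _

theorem pvGo_cur (d : Char) (n : Nat) : ∀ (s cur : List Char),
    PySem.Chars.splitOn.go [d] n s cur [] =
      pvConsHead cur.reverse (PySem.Chars.splitOn.go [d] n s [] []) := by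
  induction n with
  | zero =>
    intro s cur
    rw [PySem.Chars.splitOn.go, PySem.Chars.splitOn.go] <;> simp [pvConsHead]
  | succ n ih =>
    intro s cur
    cases s with
    | nil =>
      rw [PySem.Chars.splitOn.go, PySem.Chars.splitOn.go] <;> simp [pvConsHead]
    | cons c cs =>
      rw [PySem.Chars.splitOn.go, PySem.Chars.splitOn.go]
      by_cases h : [d].isPrefixOf (c :: cs) = true
      · simp only [h, if_true, List.reverse_nil]
        rw [pvGo_acc d n _ [] [[]], pvGo_acc d n _ [] [cur.reverse]]
        simp [pvConsHead]
      · simp only [h, Bool.false_eq_true, if_false]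
        rw [ih cs (c :: cur), ih cs [c], pvConsHead_consHead]
        simp

theorem pvSplitOn_nil (d : Char) : PySem.Chars.splitOn [] [d] = [[]] := by
  rw [PySem.Chars.splitOn, PySem.Chars.splitOn.go] <;> simp

theorem pvSplitOn_cons (c d : Char) (cs : List Char) :
    PySem.Chars.splitOn (c :: cs) [d] =
      if c = d then [] :: PySem.Chars.splitOn cs [d]
      else pvConsHead [c] (PySem.Chars.splitOn cs [d]) := by
  rw [PySem.Chars.splitOn, PySem.Chars.splitOn]
  simp only [List.length_cons]
  rw [PySem.Chars.splitOn.go]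
  by_cases h : c = d
  · have hp : [d].isPrefixOf (c :: cs) = true := by simp [h, List.isPrefixOf]
    subst h
    simp only [hp, if_true, List.reverse_nil]
    rw [pvGo_acc c (cs.length + 1) _ [] [[]]]
    simp
  · have hp : [d].isPrefixOf (c :: cs) = false := by
      simp [List.isPrefixOf]
      exact fun hdc => absurd hdc.symm h
    simp only [hp, Bool.false_eq_true, if_false, h]
    rw [pvGo_cur d (cs.length + 1) cs [c]]
    rfl

theorem pvConsHead_ne_nil (x : List Char) (r : List (List Char)) : pvConsHead x r ≠ [] := by
  cases r <;> simp [pvConsHead]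

theorem pvSplitOn_ne_nil (d : Char) (cs : List Char) : PySem.Chars.splitOn cs [d] ≠ [] := by
  cases cs with
  | nil => simp [pvSplitOn_nil]
  | cons c cs =>
    rw [pvSplitOn_cons]
    split_ifs
    · simp
    · exact pvConsHead_ne_nil _ _

def pvRaw : Bool → List Char → List (List Char)
  | _, [] => [[]]
  | q, c :: cs =>
    if c = '"' then pvRaw (!q) cs
    else if c = ',' ∧ q = false then [] :: pvRaw q cs
    else pvConsHead [c] (pvRaw q cs)

theorem pvRaw_ne_nil (cs : List Char) : ∀ (q : Bool), pvRaw q cs ≠ [] := by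
  induction cs with
  | nil => intro q; simp [pvRaw]
  | cons c cs ih =>
    intro q
    simp only [pvRaw]
    split_ifs
    · exact ih _
    · simp
    · exact pvConsHead_ne_nil _ _

theorem pvConsHead_nil_of_ne (r : List (List Char)) (h : r ≠ []) : pvConsHead [] r = r := by
  cases r with
  | nil => exact absurd rfl h
  | cons f fs => simp [pvConsHead]

def pvGlue : List (List Char) → List (List Char) → List (List Char)
  | [], r => r
  | [p], r => pvConsHead p r
  | p :: q :: ps, r => p :: pvGlue (q :: ps) r

def pvRawJoin : Bool → List (List Char) → List (List Char)
  | _, [] => [[]]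
  | q, s :: ss =>
    if q then pvConsHead s (pvRawJoin (!q) ss)
    else pvGlue (PySem.Chars.splitOn s [',']) (pvRawJoin (!q) ss)

-- glue of a consHead: the prepended prefix stays on the first field

theorem pvGlue_consHead (x : List Char) (ps r : List (List Char)) (h : ps ≠ []) :
    pvGlue (pvConsHead x ps) r = pvConsHead x (pvGlue ps r) := by
  cases ps with
  | nil => exact absurd rfl h
  | cons p ps' =>
    cases ps' with
    | nil => cases r <;> simp [pvConsHead, pvGlue]
    | cons p2 ps'' => simp [pvConsHead, pvGlue]

theorem pvGlue_append_single (Y : List (List Char)) (a : List Char) (Z : List (List Char)) :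
    pvGlue (Y ++ [a]) Z = Y ++ pvConsHead a Z := by
  induction Y with
  | nil => simp [pvGlue]
  | cons y Y ih =>
    cases Y with
    | nil => simp [pvGlue, pvConsHead_ne_nil]
    | cons y2 Y2 => simp_all [pvGlue]

theorem pvRawJoin_eq_raw (line : List Char) : ∀ q,
    pvRawJoin q (PySem.Chars.splitOn line ['"']) = pvRaw q line := by
  induction line with
  | nil =>
    intro q
    rw [pvSplitOn_nil]
    cases q <;> simp [pvRawJoin, pvRaw, pvSplitOn_nil, pvGlue, pvConsHead]
  | cons c cs ih =>
    intro q
    rw [pvSplitOn_cons]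
    by_cases hq : c = '"'
    · simp only [hq, if_true]
      have h1 : pvRawJoin q ([] :: PySem.Chars.splitOn cs ['"']) =
          pvConsHead [] (pvRawJoin (!q) (PySem.Chars.splitOn cs ['"'])) := by
        cases q
        · simp only [pvRawJoin, Bool.false_eq_true, if_false, pvSplitOn_nil, pvGlue]
        · simp only [pvRawJoin, if_true]
      rw [h1, ih (!q), pvConsHead_nil_of_ne _ (pvRaw_ne_nil _ _)]
      simp [pvRaw, hq]
    · simp only [hq, if_false]
      obtain ⟨f, fs, hS⟩ : ∃ f fs, PySem.Chars.splitOn cs ['"'] = f :: fs := by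
        cases hS : PySem.Chars.splitOn cs ['"'] with
        | nil => exact absurd hS (pvSplitOn_ne_nil _ _)
        | cons f fs => exact ⟨f, fs, rfl⟩
      rw [hS]
      simp only [pvConsHead, List.singleton_append]
      cases q with
      | true =>
        simp only [pvRawJoin, if_true, Bool.not_true]
        have : pvConsHead (c :: f) (pvRawJoin false fs) =
            pvConsHead [c] (pvConsHead f (pvRawJoin false fs)) := by
          rw [pvConsHead_consHead]; rfl
        rw [this]
        have h2 : pvConsHead f (pvRawJoin false fs) = pvRawJoin true (f :: fs) := by
          simp [pvRawJoin]
        rw [h2, ← hS, ih true]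
        simp [pvRaw, hq]
      | false =>
        simp only [pvRawJoin, Bool.false_eq_true, if_false, Bool.not_false]
        by_cases hc : c = ','
        · subst hc
          rw [pvSplitOn_cons]
          simp only [reduceIte]
          obtain ⟨pf, pfs, hP⟩ : ∃ pf pfs, PySem.Chars.splitOn f [','] = pf :: pfs := by
            cases hP : PySem.Chars.splitOn f [','] with
            | nil => exact absurd hP (pvSplitOn_ne_nil _ _)
            | cons pf pfs => exact ⟨pf, pfs, rfl⟩
          rw [hP]
          have h3 : pvGlue ([] :: pf :: pfs) (pvRawJoin true fs) =
              [] :: pvGlue (pf :: pfs) (pvRawJoin true fs) := by simp [pvGlue]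
          rw [h3, ← hP]
          have h4 : pvGlue (PySem.Chars.splitOn f [',']) (pvRawJoin true fs) =
              pvRawJoin false (f :: fs) := by simp [pvRawJoin]
          rw [h4, ← hS, ih false]
          simp [pvRaw, hq]
        · rw [pvSplitOn_cons]
          simp only [if_neg hc]
          rw [pvGlue_consHead _ _ _ (pvSplitOn_ne_nil _ _)]
          have h4 : pvGlue (PySem.Chars.splitOn f [',']) (pvRawJoin true fs) =
              pvRawJoin false (f :: fs) := by simp [pvRawJoin]
          rw [h4, ← hS, ih false]
          simp [pvRaw, hq, hc]

theorem pvFoldA (cs : List Char) : ∀ (parts : List (List Char)) (cur : List Char) (q : Bool),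
    (cs.foldl pvAStep (parts, cur, q)).1 ++
      [PySem.Chars.strip (cs.foldl pvAStep (parts, cur, q)).2.1] =
    parts ++ (pvConsHead cur (pvRaw q cs)).map PySem.Chars.strip := by
  induction cs with
  | nil => intro parts cur q; simp [pvRaw, pvConsHead]
  | cons c cs ih =>
    intro parts cur q
    simp only [List.foldl_cons, pvAStep, pvRaw]
    by_cases h1 : c = '"'
    · simp only [h1, if_true]
      exact ih parts cur (!q)
    · simp only [h1, if_false]
      by_cases h2 : c = ',' ∧ q = false
      · obtain ⟨hc, hqf⟩ := h2
        subst hc; subst hqf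
        simp only [and_self, reduceIte]
        rw [ih (parts ++ [PySem.Chars.strip cur]) [] false]
        have hr := pvRaw_ne_nil cs false
        rw [pvConsHead_nil_of_ne _ hr]
        cases hraw : pvRaw false cs with
        | nil => exact absurd hraw hr
        | cons f fs => simp [pvConsHead]
      · simp only [h2, if_false]
        rw [ih parts (cur ++ [c]) q, ← pvConsHead_consHead]

theorem pvBAppLast_ne_nil (r : List (List Char)) (x : List Char) : pvBAppLast r x ≠ [] := by
  cases r <;> simp [pvBAppLast]

theorem pvGlue_nil_right (P : List (List Char)) (h : P ≠ []) : pvGlue P [[]] = P := by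
  induction P with
  | nil => exact absurd rfl h
  | cons p P ih =>
    cases P with
    | nil => simp [pvGlue, pvConsHead]
    | cons p2 P2 => simp [pvGlue, ih]

theorem pvAppLast_reverse_glue (r : List (List Char)) (x : List Char)
    (Z : List (List Char)) (h : r ≠ []) :
    pvGlue (pvBAppLast r x).reverse Z = pvGlue r.reverse (pvConsHead x Z) := by
  cases r with
  | nil => exact absurd rfl h
  | cons hd t =>
    simp only [pvBAppLast, List.reverse_cons]
    rw [pvGlue_append_single, pvGlue_append_single, ← pvConsHead_consHead]

theorem pvFoldB (segs : List (List Char)) : ∀ (r : List (List Char)) (q : Bool), r ≠ [] →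
    ((segs.foldl pvBSeg (r, q)).1).reverse = pvGlue r.reverse (pvRawJoin q segs) := by
  induction segs with
  | nil =>
    intro r q h
    simp only [List.foldl_nil, pvRawJoin]
    rw [pvGlue_nil_right _ (by simpa using h)]
  | cons s ss ih =>
    intro r q h
    simp only [List.foldl_cons, pvBSeg, pvRawJoin]
    cases q with
    | true =>
      simp only [if_true, Bool.not_true]
      rw [ih _ false (pvBAppLast_ne_nil _ _), pvAppLast_reverse_glue _ _ _ h]
    | false =>
      simp only [Bool.false_eq_true, if_false, Bool.not_false]
      obtain ⟨p0, pt, hP⟩ : ∃ p0 pt, PySem.Chars.splitOn s [','] = p0 :: pt := by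
        cases hP : PySem.Chars.splitOn s [','] with
        | nil => exact absurd hP (pvSplitOn_ne_nil _ _)
        | cons p0 pt => exact ⟨p0, pt, rfl⟩
      rw [hP]
      simp only [List.tail_cons, List.headD_cons]
      rw [ih _ true (by simp [pvBAppLast_ne_nil])]
      rw [List.reverse_append, List.reverse_reverse]
      -- goal: pvGlue ((pvBAppLast r p0).reverse ++ pt) Z' = pvGlue r.reverse (pvGlue (p0 :: pt) Z')
      cases r with
      | nil => exact absurd rfl h
      | cons hd t =>
        simp only [pvBAppLast, List.reverse_cons]
        rcases List.eq_nil_or_concat pt with hpt | ⟨pt', pl, hpt⟩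
        · subst hpt
          simp only [List.append_nil, pvGlue]
          rw [pvGlue_append_single, pvGlue_append_single, ← pvConsHead_consHead]
        · subst hpt
          rw [List.concat_eq_append] at *
          rw [show t.reverse ++ [hd ++ p0] ++ (pt' ++ [pl]) =
                (t.reverse ++ [hd ++ p0] ++ pt') ++ [pl] by simp,
              pvGlue_append_single]
          rw [show p0 :: (pt' ++ [pl]) = (p0 :: pt') ++ [pl] by simp,
              pvGlue_append_single, pvGlue_append_single]
          simp [pvConsHead]

theorem pvGlue_ne_nil (ps r : List (List Char)) (h : ps ≠ []) : pvGlue ps r ≠ [] := by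
  cases ps with
  | nil => exact absurd rfl h
  | cons p ps' =>
    cases ps' with
    | nil => exact pvConsHead_ne_nil _ _
    | cons p2 ps'' => simp [pvGlue]

theorem pvRawJoin_ne_nil (segs : List (List Char)) (q : Bool) : pvRawJoin q segs ≠ [] := by
  cases segs with
  | nil => simp [pvRawJoin]
  | cons s ss =>
    simp only [pvRawJoin]
    split_ifs
    · exact pvConsHead_ne_nil _ _
    · exact pvGlue_ne_nil _ _ (pvSplitOn_ne_nil _ _)

theorem pvFields_eq (line : List Char) : pvBFields line = pvAParts line := by
  unfold pvBFields pvAParts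
  simp only []
  rw [pvFoldB _ _ _ (by simp), pvFoldA]
  have h1 : pvGlue ([[]] : List (List Char)).reverse (pvRawJoin false (PySem.Chars.splitOn line ['"'])) =
      pvRawJoin false (PySem.Chars.splitOn line ['"']) := by
    show pvGlue [[]] _ = _
    show pvConsHead [] _ = _
    exact pvConsHead_nil_of_ne _ (pvRawJoin_ne_nil _ _)
  rw [h1, pvRawJoin_eq_raw, pvConsHead_nil_of_ne _ (pvRaw_ne_nil _ _)]
  simp [List.map_map, Function.comp]

set_option maxHeartbeats 1000000 in
theorem pvLine_eq (st : List (List (String × String)) × List (List Char)) (p : Int × List Char)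
    (h : PySem.Chars.strip p.2 ≠ []) :
    pvALine st p = (st.1 ++ (pvBJudge p.1 (pvBFields p.2)).1.toList,
                    st.2 ++ (pvBJudge p.1 (pvBFields p.2)).2.toList) := by
  rw [pvFields_eq]
  unfold pvALine pvBJudge
  simp only [if_neg h]
  by_cases hlen : 6 ≤ (pvAParts p.2).length
  · simp only [if_pos hlen, if_neg (by omega : ¬ (pvAParts p.2).length < 6)]
    obtain ⟨p0, p1, p2, p3, p4, p5, rest, hparts⟩ :
        ∃ p0 p1 p2 p3 p4 p5 rest, pvAParts p.2 = p0 :: p1 :: p2 :: p3 :: p4 :: p5 :: rest := by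
      match hp : pvAParts p.2, hlen with
      | p0 :: p1 :: p2 :: p3 :: p4 :: p5 :: rest, _ => exact ⟨_, _, _, _, _, _, _, rfl⟩
    rw [hparts]
    have g0 : PySem.List.pyGetD (p0 :: p1 :: p2 :: p3 :: p4 :: p5 :: rest) (0:Int) ([]:List Char) = p0 := by
      simp [pysem]
    have g1 : PySem.List.pyGetD (p0 :: p1 :: p2 :: p3 :: p4 :: p5 :: rest) (1:Int) ([]:List Char) = p1 := by
      simp [pysem]
    have g2 : PySem.List.pyGetD (p0 :: p1 :: p2 :: p3 :: p4 :: p5 :: rest) (2:Int) ([]:List Char) = p2 := by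
      simp [pysem]
    have g3 : PySem.List.pyGetD (p0 :: p1 :: p2 :: p3 :: p4 :: p5 :: rest) (3:Int) ([]:List Char) = p3 := by
      simp [pysem]
    have g4 : PySem.List.pyGetD (p0 :: p1 :: p2 :: p3 :: p4 :: p5 :: rest) (4:Int) ([]:List Char) = p4 := by
      simp [pysem]
    have g5 : PySem.List.pyGetD (p0 :: p1 :: p2 :: p3 :: p4 :: p5 :: rest) (5:Int) ([]:List Char) = p5 := by
      simp [pysem]
    have hsl : PySem.List.slice (p0 :: p1 :: p2 :: p3 :: p4 :: p5 :: rest) (some 1) (some 5)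
        = [p1, p2, p3, p4] := by simp [pysem]
    rw [g0, g1, g2, g3, g4, g5, hsl]
    rw [if_pos (show 1 < (p0 :: p1 :: p2 :: p3 :: p4 :: p5 :: rest).length by simp),
        if_pos (show 2 < (p0 :: p1 :: p2 :: p3 :: p4 :: p5 :: rest).length by simp),
        if_pos (show 3 < (p0 :: p1 :: p2 :: p3 :: p4 :: p5 :: rest).length by simp),
        if_pos (show 4 < (p0 :: p1 :: p2 :: p3 :: p4 :: p5 :: rest).length by simp)]
    simp only [List.all_cons, List.all_nil, Bool.and_eq_true, Bool.not_eq_true',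
      List.isEmpty_eq_false_iff, and_true, List.mem_cons, List.not_mem_nil, or_false]
    split_ifs with hA hB <;> first | simp | (exfalso; tauto)
  · simp only [if_neg hlen, if_pos (by omega : (pvAParts p.2).length < 6)]
    simp

theorem pvFold_outer (L : List (Int × List Char)) :
    ∀ (qs : List (List (String × String))) (errs : List (List Char)),
    L.foldl pvALine (qs, errs) =
      (qs ++ ((L.filter (fun p => !(PySem.Chars.strip p.2).isEmpty)).map
          (fun p => pvBJudge p.1 (pvBFields p.2))).filterMap (·.1),
       errs ++ ((L.filter (fun p => !(PySem.Chars.strip p.2).isEmpty)).map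
          (fun p => pvBJudge p.1 (pvBFields p.2))).filterMap (·.2)) := by
  induction L with
  | nil => intro qs errs; simp
  | cons p L ih =>
    intro qs errs
    by_cases hb : PySem.Chars.strip p.2 = []
    · have hf : (!(PySem.Chars.strip p.2).isEmpty) = false := by
        simp [hb]
      simp only [List.foldl_cons, List.filter_cons, hf, if_false]
      have : pvALine (qs, errs) p = (qs, errs) := by
        unfold pvALine
        rw [if_pos hb]
      rw [this, ih]
      rfl
    · have hf : (!(PySem.Chars.strip p.2).isEmpty) = true := by
        simp [List.isEmpty_eq_false_iff, hb]
      simp only [List.foldl_cons, List.filter_cons, hf, if_true, List.map_cons]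
      rw [pvLine_eq (qs, errs) p hb]
      rw [ih]
      cases hj : pvBJudge p.1 (pvBFields p.2) with
      | mk o e =>
        cases o <;> cases e <;> simp [List.filterMap_cons, hj]

-- ===== VERDICT (by name: the statement is the Claim_ definition above) =====
theorem parse_single_csv_spec : Claim_equal_parse_single_csv := by
  intro csv _
  unfold Spec_parse_single_csv parse_single_csv parse_single_csv_alt
  simp only [pvFold_outer, List.nil_append]
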